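-- pv_equiv track=rewrite | github.com/NLP-UET/Roberta-NER | roberta-base.py | convert_to_main_labels
-- ===== SOURCE A (Python) =====
-- def convert_to_main_labels(labels):
--     label_map = {
--         "B-PER": "PER", "I-PER": "PER",
--         "B-ORG": "ORG", "I-ORG": "ORG",
--         "B-LOC": "LOC", "I-LOC": "LOC",
--         "B-MISC": "MISC", "I-MISC": "MISC",
--         "O": "O"
--     }
--     return [label_map.get(label, "O") for label in labels]
-- ===== SOURCE B (Python) =====
-- def convert_to_main_labels(labels):
--     main = {"PER", "ORG", "LOC", "MISC"}
--     out = []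
--     for label in labels:
--         if len(label) > 2 and label[1] == '-' and label[0] in ("B", "I") and label[2:] in main:
--             out.append(label[2:])
--         else:
--             out.append("O")
--     return out
-- ===== Notes on version B (the rewrite author's own statement) =====
-- stated objective: idiomatic
-- what changed: Replaced A's hard-coded 9-entry dict lookup by parsing each label (length>2, '-' at position 1, B/I prefix, suffix validated against the main-entity set {PER,ORG,LOC,MISC}), returning the suffix or 'O'.
import Mathlib
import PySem

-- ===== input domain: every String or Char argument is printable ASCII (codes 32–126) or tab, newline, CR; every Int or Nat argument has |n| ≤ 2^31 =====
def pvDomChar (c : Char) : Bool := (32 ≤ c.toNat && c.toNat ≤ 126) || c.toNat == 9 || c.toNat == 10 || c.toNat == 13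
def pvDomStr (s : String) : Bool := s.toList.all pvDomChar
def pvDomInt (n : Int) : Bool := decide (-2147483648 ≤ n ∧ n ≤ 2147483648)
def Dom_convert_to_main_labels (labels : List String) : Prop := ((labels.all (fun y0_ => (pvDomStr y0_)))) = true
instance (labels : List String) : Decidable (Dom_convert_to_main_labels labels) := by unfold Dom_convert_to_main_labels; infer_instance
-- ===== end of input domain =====

-- B replaces A's literal 9-entry dict lookup by parsing each label ("prefix-dash-suffix" with a B/I prefix and a suffix in the main-entity set); same return values, objective: alternative/idiomatic.

-- ===== PORT A =====
def pvLabelMap : PySem.Dict String String :=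
  PySem.Dict.ofList
    [("B-PER", "PER"), ("I-PER", "PER"),
     ("B-ORG", "ORG"), ("I-ORG", "ORG"),
     ("B-LOC", "LOC"), ("I-LOC", "LOC"),
     ("B-MISC", "MISC"), ("I-MISC", "MISC"),
     ("O", "O")]

def convert_to_main_labels (labels : List String) : List String :=
  labels.map (fun label => pvLabelMap.getD label "O")

-- ===== PORT B =====
def pvMain : PySem.Set String := PySem.Set.ofList ["PER", "ORG", "LOC", "MISC"]

def convert_to_main_labels_alt (labels : List String) : List String :=
  labels.foldl (fun out label =>
    if 2 < PySem.Str.len label ∧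
       PySem.Str.pyGet? label 1 = some '-' ∧
       (PySem.Str.pyGet? label 0 = some 'B' ∨ PySem.Str.pyGet? label 0 = some 'I') ∧
       PySem.Str.slice label (some 2) none ∈ pvMain
    then out ++ [PySem.Str.slice label (some 2) none]
    else out ++ ["O"]) []

-- ===== PRECONDITION & SPEC =====
def Spec_convert_to_main_labels (labels : List String) (out : List String) : Prop := out = convert_to_main_labels_alt labels
instance (labels : List String) (out : List String) : Decidable (Spec_convert_to_main_labels labels out) := by unfold Spec_convert_to_main_labels; infer_instance

-- ===== CLAIM (what is proved, stated in full; the proofs are below) =====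
def Claim_equal_convert_to_main_labels : Prop := ∀ (labels : List String), Dom_convert_to_main_labels labels → Spec_convert_to_main_labels labels (convert_to_main_labels labels)

-- ===== LEMMAS AND PROOFS =====

-- per-label function of B's loop body
def pvParse (label : String) : String :=
  if 2 < PySem.Str.len label ∧
     PySem.Str.pyGet? label 1 = some '-' ∧
     (PySem.Str.pyGet? label 0 = some 'B' ∨ PySem.Str.pyGet? label 0 = some 'I') ∧
     PySem.Str.slice label (some 2) none ∈ pvMain
  then PySem.Str.slice label (some 2) none
  else "O"

lemma alt_eq_map (labels : List String) :
    convert_to_main_labels_alt labels = labels.map pvParse := by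
  unfold convert_to_main_labels_alt
  have hbody : (fun (out : List String) label =>
      if 2 < PySem.Str.len label ∧
         PySem.Str.pyGet? label 1 = some '-' ∧
         (PySem.Str.pyGet? label 0 = some 'B' ∨ PySem.Str.pyGet? label 0 = some 'I') ∧
         PySem.Str.slice label (some 2) none ∈ pvMain
      then out ++ [PySem.Str.slice label (some 2) none]
      else out ++ ["O"]) = (fun out label => out ++ [pvParse label]) := by
    funext out label
    unfold pvParse
    split <;> rfl
  rw [hbody, PySem.List.foldl_append_singleton_eq_map]
  rfl

-- if B's guard holds, the label is one of the eight tagged literals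
lemma guard_cases (s : String)
    (h : 2 < PySem.Str.len s ∧
       PySem.Str.pyGet? s 1 = some '-' ∧
       (PySem.Str.pyGet? s 0 = some 'B' ∨ PySem.Str.pyGet? s 0 = some 'I') ∧
       PySem.Str.slice s (some 2) none ∈ pvMain) :
    s = "B-PER" ∨ s = "I-PER" ∨ s = "B-ORG" ∨ s = "I-ORG" ∨
    s = "B-LOC" ∨ s = "I-LOC" ∨ s = "B-MISC" ∨ s = "I-MISC" := by
  obtain ⟨hlen, h1, h0, hm⟩ := h
  have hdrop : (PySem.Str.slice s (some 2) none).toList = s.toList.drop 2 := by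
    rw [PySem.Str.toList_slice, PySem.Chars.slice_eq_listSlice,
      PySem.List.slice_from (xs := s.toList) (a := 2) (by norm_num)]
    rfl
  have hm' : s.toList.drop 2 = "PER".toList ∨ s.toList.drop 2 = "ORG".toList ∨
      s.toList.drop 2 = "LOC".toList ∨ s.toList.drop 2 = "MISC".toList := by
    have h2 := (PySem.Set.mem_ofList _ _).mp hm
    simp only [List.mem_cons, List.not_mem_nil, or_false] at h2
    rw [← hdrop]
    rcases h2 with h|h|h|h <;> rw [h] <;> simp
  simp [pysem] at h0 h1
  simp only [← String.toList_inj]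
  match hl : s.toList, h0, h1 with
  | c0 :: c1 :: t, h0, h1 =>
    simp at h0 h1
    rw [hl] at hm'
    simp at hm'
    rcases h0 with h0|h0 <;> rcases hm' with hm'|hm'|hm'|hm' <;> subst h0 h1 hm' <;> simp
  | [], h0, _ => simp at h0
  | [c], _, h1 => simp at h1

lemma per_label (s : String) : pvLabelMap.getD s "O" = pvParse s := by
  by_cases e1 : s = "B-PER"; · subst e1; decide
  by_cases e2 : s = "I-PER"; · subst e2; decide
  by_cases e3 : s = "B-ORG"; · subst e3; decide
  by_cases e4 : s = "I-ORG"; · subst e4; decide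
  by_cases e5 : s = "B-LOC"; · subst e5; decide
  by_cases e6 : s = "I-LOC"; · subst e6; decide
  by_cases e7 : s = "B-MISC"; · subst e7; decide
  by_cases e8 : s = "I-MISC"; · subst e8; decide
  have hB : pvParse s = "O" := by
    unfold pvParse
    rw [if_neg]
    intro h
    rcases guard_cases s h with h|h|h|h|h|h|h|h <;> simp_all
  rw [hB]
  by_cases e9 : s = "O"
  · subst e9; decide
  · simp only [pvLabelMap, PySem.Dict.ofList, PySem.Dict.update, PySem.Dict.empty, List.foldl]
    rw [PySem.Dict.getD_insert_of_ne _ "O" "O" e9,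
      PySem.Dict.getD_insert_of_ne _ "MISC" "O" e8,
      PySem.Dict.getD_insert_of_ne _ "MISC" "O" e7,
      PySem.Dict.getD_insert_of_ne _ "LOC" "O" e6,
      PySem.Dict.getD_insert_of_ne _ "LOC" "O" e5,
      PySem.Dict.getD_insert_of_ne _ "ORG" "O" e4,
      PySem.Dict.getD_insert_of_ne _ "ORG" "O" e3,
      PySem.Dict.getD_insert_of_ne _ "PER" "O" e2,
      PySem.Dict.getD_insert_of_ne _ "PER" "O" e1]
    simp [PySem.Dict.getD, PySem.Dict.get?]

-- ===== VERDICT (by name: the statement is the Claim_ definition above) =====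
theorem convert_to_main_labels_spec : Claim_equal_convert_to_main_labels := by
  intro labels _
  unfold Spec_convert_to_main_labels convert_to_main_labels
  rw [alt_eq_map]
  exact List.map_congr_left (fun s _ => per_label s)
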